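-- pv_equiv track=rewrite | github.com/D1-B2B-AX/ld-ops-plugin | scripts/generate_ops_md.py | format_session_range_v2
-- ===== SOURCE A (Python) =====
-- def format_session_range_v2(session_nos):
--     """[4,5,6] → '4~6회차', [4,7,9] → '4·7·9회차', [4] → '4회차', [] → ''."""
--     if not session_nos:
--         return ""
--     sorted_nos = sorted(set(s for s in session_nos if s is not None))
--     if not sorted_nos:
--         return ""
--     if len(sorted_nos) == 1:
--         return f"{sorted_nos[0]}회차"
--     is_continuous = all(
--         sorted_nos[i + 1] - sorted_nos[i] == 1 for i in range(len(sorted_nos) - 1)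
--     )
--     if is_continuous:
--         return f"{sorted_nos[0]}~{sorted_nos[-1]}회차"
--     return f"{'·'.join(str(n) for n in sorted_nos)}회차"
-- ===== SOURCE B (Python) =====
-- def format_session_range_v2(session_nos):
--     """[4,5,6] -> '4~6회차', [4,7,9] -> '4·7·9회차', [4] -> '4회차', [] -> ''.
--
--     Cardinality check: distinct ints lo..hi fill the range iff hi-lo+1 == len(pool),
--     so min/max/len decide contiguity with no sort and no adjacent scan; the sort is
--     only done on the non-contiguous dotted branch."""
--     pool = {s for s in session_nos if s is not None}
--     if not pool:
--         return ""
--     lo, hi = min(pool), max(pool)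
--     if lo == hi:
--         return f"{lo}회차"
--     if hi - lo + 1 == len(pool):
--         return f"{lo}~{hi}회차"
--     return "·".join(str(n) for n in sorted(pool)) + "회차"
-- ===== Notes on version B (the rewrite author's own statement) =====
-- stated objective: alternative
-- what changed: A sorts the deduplicated values up front and decides contiguity by an all() scan of adjacent differences; B never scans adjacencies: it takes min, max and the cardinality of the deduplicated set and uses the fact that distinct integers are contiguous iff max-min+1 equals their count, sorting only on the non-contiguous dotted branch.
import Mathlib
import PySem

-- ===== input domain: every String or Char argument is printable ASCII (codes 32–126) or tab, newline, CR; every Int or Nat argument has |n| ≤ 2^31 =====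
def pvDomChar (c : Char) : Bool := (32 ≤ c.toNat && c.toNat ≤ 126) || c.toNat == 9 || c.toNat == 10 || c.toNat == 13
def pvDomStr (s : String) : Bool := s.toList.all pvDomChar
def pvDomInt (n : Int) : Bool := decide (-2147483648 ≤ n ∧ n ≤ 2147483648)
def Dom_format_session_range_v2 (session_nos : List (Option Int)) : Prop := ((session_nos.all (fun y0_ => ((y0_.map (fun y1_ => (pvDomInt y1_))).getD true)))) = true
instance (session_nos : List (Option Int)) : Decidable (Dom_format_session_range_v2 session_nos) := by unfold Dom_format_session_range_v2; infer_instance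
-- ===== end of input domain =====

-- B replaces A's sort-then-adjacent-difference all() scan by a cardinality argument on the
-- deduplicated set: distinct integers are contiguous iff max-min+1 equals their count, so B
-- decides contiguity from min/max/len without sorting; objective: alternative.

-- ===== PORT A =====
def format_session_range_v2 (session_nos : List (Option Int)) : String :=
  if session_nos = [] then "" else
  -- sorted(set(s for s in session_nos if s is not None))
  let sorted_nos : List Int :=
    PySem.List.sorted (PySem.Set.ofList (session_nos.filterMap (fun s => s))) (fun x => x) false
  if sorted_nos = [] then "" else
  if sorted_nos.length = 1 then
    PySem.Int.toStr (PySem.List.pyGetD sorted_nos 0 0) ++ "회차"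
  else
    let is_continuous : Bool :=
      (PySem.List.pyRange 0 ((sorted_nos.length : Int) - 1) 1).all
        (fun i => PySem.List.pyGetD sorted_nos (i + 1) 0 - PySem.List.pyGetD sorted_nos i 0 == 1)
    if is_continuous then
      PySem.Int.toStr (PySem.List.pyGetD sorted_nos 0 0) ++ "~" ++
        PySem.Int.toStr (PySem.List.pyGetD sorted_nos (-1) 0) ++ "회차"
    else
      PySem.Str.join "·" (sorted_nos.map PySem.Int.toStr) ++ "회차"

-- ===== PORT B =====
def format_session_range_v2_alt (session_nos : List (Option Int)) : String :=
  -- pool = {s for s in session_nos if s is not None}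
  let pool : PySem.Set Int := PySem.Set.ofList (session_nos.filterMap (fun s => s))
  if pool = [] then "" else
  -- lo, hi = min(pool), max(pool)   (guarded: pool nonempty, so min?/max? are some)
  let lo : Int := (PySem.List.min? pool (fun x => x)).getD 0
  let hi : Int := (PySem.List.max? pool (fun x => x)).getD 0
  if lo = hi then
    PySem.Int.toStr lo ++ "회차"
  else if hi - lo + 1 = (pool.length : Int) then
    PySem.Int.toStr lo ++ "~" ++ PySem.Int.toStr hi ++ "회차"
  else
    PySem.Str.join "·" ((PySem.List.sorted pool (fun x => x) false).map PySem.Int.toStr) ++ "회차"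

-- ===== PRECONDITION & SPEC =====
def Spec_format_session_range_v2 (session_nos : List (Option Int)) (out : String) : Prop := out = format_session_range_v2_alt session_nos
instance (session_nos : List (Option Int)) (out : String) : Decidable (Spec_format_session_range_v2 session_nos out) := by unfold Spec_format_session_range_v2; infer_instance

-- ===== CLAIM (what is proved, stated in full; the proofs are below) =====
def Claim_equal_format_session_range_v2 : Prop := ∀ (session_nos : List (Option Int)), Dom_format_session_range_v2 session_nos → Spec_format_session_range_v2 session_nos (format_session_range_v2 session_nos)

-- ===== LEMMAS AND PROOFS =====

-- sorted_nos[0] is the head.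
lemma pv_getD_zero (l : List Int) (h : l ≠ []) : PySem.List.pyGetD l 0 0 = l.head h := by
  rcases l with _ | ⟨a, t⟩
  · exact absurd rfl h
  · simp [PySem.List.pyGetD, PySem.List.pyGet?, PySem.List.pyIdx?]

-- sorted_nos[-1] is the last element.
lemma pv_getD_neg_one (l : List Int) (h : l ≠ []) : PySem.List.pyGetD l (-1) 0 = l.getLast h := by
  have hl : 1 ≤ l.length := List.length_pos_iff.mpr h
  simp [PySem.List.pyGetD, PySem.List.pyGet?, PySem.List.pyIdx?, hl,
    List.getElem?_eq_getElem (by omega : l.length - 1 < l.length), List.getLast_eq_getElem]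

-- A's adjacent-difference scan, characterised elementwise.
lemma pv_A_cond_iff (l : List Int) :
    ((PySem.List.pyRange 0 ((l.length : Int) - 1) 1).all
        (fun i => PySem.List.pyGetD l (i + 1) 0 - PySem.List.pyGetD l i 0 == 1)) = true
      ↔ ∀ k : Nat, (h : k + 1 < l.length) → l[k + 1] = l[k] + 1 := by
  rw [List.all_eq_true]
  constructor
  · intro hall k hk
    have hmem : (k : Int) ∈ PySem.List.pyRange 0 ((l.length : Int) - 1) 1 := by
      rw [PySem.List.mem_pyRange_one]; omega
    have hthis := hall _ hmem
    rw [beq_iff_eq, show ((k : Int) + 1) = ((k + 1 : Nat) : Int) by push_cast; ring,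
        PySem.List.pyGetD_natCast, PySem.List.pyGetD_natCast,
        List.getD_eq_getElem l 0 (by omega), List.getD_eq_getElem l 0 (by omega)] at hthis
    omega
  · intro h i hi
    rw [PySem.List.mem_pyRange_one] at hi
    have hik : i = ((i.toNat : Nat) : Int) := by omega
    rw [beq_iff_eq, hik, show ((i.toNat : Int) + 1) = ((i.toNat + 1 : Nat) : Int) by push_cast; ring,
        PySem.List.pyGetD_natCast, PySem.List.pyGetD_natCast,
        List.getD_eq_getElem l 0 (by omega), List.getD_eq_getElem l 0 (by omega)]
    have := h i.toNat (by omega)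
    omega

-- Strictly increasing ints gain at least 1 per step: l[p] + (q-p) ≤ l[q].
lemma pv_gap_le (l : List Int) (hpw : l.Pairwise (· < ·)) :
    ∀ q p : Nat, (hpq : p ≤ q) → (hq : q < l.length) → l[p]'(by omega) + ((q : Int) - p) ≤ l[q] := by
  have hadj : ∀ j : Nat, (h : j + 1 < l.length) → l[j] < l[j + 1] := by
    intro j h
    exact List.pairwise_iff_getElem.mp hpw j (j + 1) (by omega) h (by omega)
  intro q
  induction q with
  | zero => intro p hpq hq; interval_cases p; simp
  | succ n ih =>
      intro p hpq hq
      by_cases hpn : p = n + 1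
      · subst hpn; simp
      · have h1 := ih p (by omega) (by omega)
        have h2 := hadj n hq
        push_cast at h1 ⊢
        omega

-- Under strict sortedness, "every adjacent gap is exactly 1" ⇔ "last - first + 1 = length".
lemma pv_contig_iff (l : List Int) (hpw : l.Pairwise (· < ·)) (hne : l ≠ []) :
    (∀ k : Nat, (h : k + 1 < l.length) → l[k + 1] = l[k] + 1)
      ↔ l.getLast hne - l.head hne + 1 = (l.length : Int) := by
  have hlp : 0 < l.length := List.length_pos_iff.mpr hne
  rw [List.getLast_eq_getElem, List.head_eq_getElem]
  constructor
  · intro h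
    have hk : ∀ k : Nat, (hk : k < l.length) → l[k] = l[0] + k := by
      intro k
      induction k with
      | zero => simp
      | succ n ih =>
          intro hk
          have h1 := h n (by omega)
          have h2 := ih (by omega)
          push_cast
          omega
    have := hk (l.length - 1) (by omega)
    rw [this]
    push_cast
    omega
  · intro hlen k hk1
    have hlow := pv_gap_le l hpw k 0 (by omega) (by omega)
    have hup := pv_gap_le l hpw (l.length - 1) (k + 1) (by omega) (by omega)
    have hstep := pv_gap_le l hpw (k + 1) k (by omega) hk1
    push_cast at hlow hup hstep ⊢
    omega

-- min(pool) is the head of the sorted list.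
lemma pv_min_eq_head (pool l : List Int) (hperm : l.Perm pool) (hpw : l.Pairwise (· < ·))
    (hne : l ≠ []) : (PySem.List.min? pool (fun x => x)).getD 0 = l.head hne := by
  have hpne : pool ≠ [] := fun h => hne (List.Perm.eq_nil (h ▸ hperm))
  have hlp : 0 < l.length := List.length_pos_iff.mpr hne
  rcases hm : PySem.List.min? pool (fun x => x) with _ | m
  · exact absurd ((PySem.List.min?_eq_none_iff pool (fun x => x)).mp hm) hpne
  · have hmin : ∀ y ∈ pool, m ≤ y := PySem.List.min?_isMin hm
    have hmem : m ∈ l := hperm.mem_iff.mpr (PySem.List.min?_mem hm)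
    have hle : ∀ y ∈ l, l.head hne ≤ y := by
      intro y hy
      obtain ⟨i, hi, rfl⟩ := List.mem_iff_getElem.mp hy
      rw [List.head_eq_getElem]
      by_cases hi0 : i = 0
      · subst hi0; omega
      · exact le_of_lt (List.pairwise_iff_getElem.mp hpw 0 i (by omega) hi (by omega))
    have h1 := hmin (l.head hne) (hperm.mem_iff.mp (List.head_mem hne))
    have h2 := hle m hmem
    simp only [Option.getD_some]
    omega

-- max(pool) is the last element of the sorted list.
lemma pv_max_eq_getLast (pool l : List Int) (hperm : l.Perm pool) (hpw : l.Pairwise (· < ·))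
    (hne : l ≠ []) : (PySem.List.max? pool (fun x => x)).getD 0 = l.getLast hne := by
  have hpne : pool ≠ [] := fun h => hne (List.Perm.eq_nil (h ▸ hperm))
  have hlp : 0 < l.length := List.length_pos_iff.mpr hne
  rcases hm : PySem.List.max? pool (fun x => x) with _ | m
  · exact absurd ((PySem.List.max?_eq_none_iff pool (fun x => x)).mp hm) hpne
  · have hmax : ∀ y ∈ pool, y ≤ m := PySem.List.max?_isMax hm
    have hmem : m ∈ l := hperm.mem_iff.mpr (PySem.List.max?_mem hm)
    have hle : ∀ y ∈ l, y ≤ l.getLast hne := by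
      intro y hy
      obtain ⟨i, hi, hiy⟩ := List.mem_iff_getElem.mp hy
      rw [List.getLast_eq_getElem]
      by_cases hil : i = l.length - 1
      · subst hil; omega
      · have := List.pairwise_iff_getElem.mp hpw i (l.length - 1) (by omega) (by omega) (by omega)
        omega
    have h1 := hmax (l.getLast hne) (hperm.mem_iff.mp (List.getLast_mem hne))
    have h2 := hle m hmem
    simp
    omega

-- Under strict sortedness, head = last ⇔ the list is a singleton.
lemma pv_head_eq_getLast_iff (l : List Int) (hpw : l.Pairwise (· < ·)) (hne : l ≠ []) :
    l.head hne = l.getLast hne ↔ l.length = 1 := by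
  have hlp : 0 < l.length := List.length_pos_iff.mpr hne
  rw [List.head_eq_getElem, List.getLast_eq_getElem]
  constructor
  · intro h
    by_contra hn
    have := List.pairwise_iff_getElem.mp hpw 0 (l.length - 1) (by omega) (by omega) (by omega)
    omega
  · intro h
    congr 1
    omega

-- ===== VERDICT (by name: the statement is the Claim_ definition above) =====
theorem format_session_range_v2_spec : Claim_equal_format_session_range_v2 := by
  intro session_nos _
  unfold Spec_format_session_range_v2 format_session_range_v2 format_session_range_v2_alt
  set pool : List Int := PySem.Set.ofList (session_nos.filterMap (fun s => s)) with hpool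
  set l : List Int := PySem.List.sorted pool (fun x => x) false with hl
  have hlpool : l = [] ↔ pool = [] := PySem.List.sorted_eq_nil_iff pool (fun x => x) false
  by_cases h0 : session_nos = []
  · have : pool = [] := by simp [hpool, h0, PySem.Set.ofList]
    simp [h0, this]
  · simp only [if_neg h0]
    by_cases hp : pool = []
    · simp [hp, hlpool.mpr hp]
    · have hne : l ≠ [] := fun h => hp (hlpool.mp h)
      simp only [if_neg hp, if_neg hne]
      have hperm : l.Perm pool := PySem.List.sorted_perm pool (fun x => x) false
      have hpw : l.Pairwise (· < ·) := PySem.List.sorted_ofList_pairwise_lt (session_nos.filterMap (fun s => s))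
      have hlo := pv_min_eq_head pool l hperm hpw hne
      have hhi := pv_max_eq_getLast pool l hperm hpw hne
      have hlen : pool.length = l.length := hperm.length_eq.symm
      by_cases h1 : l.length = 1
      · have heq : l.head hne = l.getLast hne := (pv_head_eq_getLast_iff l hpw hne).mpr h1
        rw [if_pos h1, if_pos (by rw [hlo, hhi, heq]), hlo, pv_getD_zero l hne]
      · have hneq : ¬ ((PySem.List.min? pool (fun x => x)).getD 0
            = (PySem.List.max? pool (fun x => x)).getD 0) := by
          rw [hlo, hhi]
          exact fun h => h1 ((pv_head_eq_getLast_iff l hpw hne).mp h)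
        rw [if_neg h1, if_neg hneq]
        have hcond : ((PySem.List.pyRange 0 ((l.length : Int) - 1) 1).all
            (fun i => PySem.List.pyGetD l (i + 1) 0 - PySem.List.pyGetD l i 0 == 1)) = true
            ↔ ((PySem.List.max? pool (fun x => x)).getD 0
              - (PySem.List.min? pool (fun x => x)).getD 0 + 1 = (pool.length : Int)) := by
          rw [pv_A_cond_iff, pv_contig_iff l hpw hne, hlo, hhi, hlen]
        by_cases h2 : ((PySem.List.max? pool (fun x => x)).getD 0
            - (PySem.List.min? pool (fun x => x)).getD 0 + 1 = (pool.length : Int))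
        · rw [if_pos (hcond.mpr h2), if_pos h2, hlo, hhi,
              pv_getD_zero l hne, pv_getD_neg_one l hne]
        · rw [if_neg (fun h => h2 (hcond.mp (by simpa using h))), if_neg h2]
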